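-- pv_equiv track=rewrite | github.com/ETO-QSH/ObsoleteProjectETO | 金运一番/sjfx.py | classify_number
-- ===== SOURCE A (Python) =====
-- from collections import Counter
--
-- def classify_number(n):
--     digits = list(str(n))
--     if '0' in digits:
--         return ''
--
--     if n == 7777:
--         return 'jackpot'
--
--     if len(set(digits)) == 1:
--         return 'four_same'
--
--     nums = [int(d) for d in digits]
--     if nums == list(range(nums[0], nums[0] + 4)) or nums == list(range(nums[0], nums[0] - 4, -1)):
--         return 'straight'
--
--     c = Counter(digits)
--     if sorted(c.values()) == [2, 2]:
--         return 'two_pairs'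
--
--     if sorted(c.values()) == [1, 3]:
--         return 'three_same'
--
--     if sorted(c.values()) == [1, 1, 2]:
--         return 'one_pair'
--
--     all_odd = all(int(d) % 2 for d in digits)
--     all_even = all(int(d) % 2 == 0 for d in digits)
--     if (all_odd or all_even) and len(set(digits)) == 4:
--         return 'special'
--
--     return 'none'
-- ===== SOURCE B (Python) =====
-- def _freqs(d):
--     # frequency partition: count of first char, then recurse on the rest without it
--     if not d:
--         return []
--     rest = [c for c in d if c != d[0]]
--     return [len(d) - len(rest)] + _freqs(rest)
--
-- def classify_number(n):
--     s = list(str(n))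
--     if '0' in s:
--         return ''
--     if n == 7777:
--         return 'jackpot'
--     part = sorted(_freqs(s))
--     if part == [len(s)]:
--         return 'four_same'
--     if len(s) == 4:
--         steps = [ord(b) - ord(a) for a, b in zip(s, s[1:])]
--         if steps == [1, 1, 1] or steps == [-1, -1, -1]:
--             return 'straight'
--         if part == [2, 2]:
--             return 'two_pairs'
--         if part == [1, 3]:
--             return 'three_same'
--         if part == [1, 1, 2]:
--             return 'one_pair'
--     if len(part) == 4 and len({ord(c) % 2 for c in s}) == 1:
--         return 'special'
--     return 'none'
-- ===== Notes on version B (the rewrite author's own statement) =====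
-- stated objective: alternative
-- what changed: B replaces Counter and the two range-list comparisons by a recursive frequency-partition of the digit list (count head, recurse on the rest), a length-guarded adjacent-difference test for straights, and run-count-based distinctness/parity-set tests, with the pattern checks gated on length 4.
import Mathlib
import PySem

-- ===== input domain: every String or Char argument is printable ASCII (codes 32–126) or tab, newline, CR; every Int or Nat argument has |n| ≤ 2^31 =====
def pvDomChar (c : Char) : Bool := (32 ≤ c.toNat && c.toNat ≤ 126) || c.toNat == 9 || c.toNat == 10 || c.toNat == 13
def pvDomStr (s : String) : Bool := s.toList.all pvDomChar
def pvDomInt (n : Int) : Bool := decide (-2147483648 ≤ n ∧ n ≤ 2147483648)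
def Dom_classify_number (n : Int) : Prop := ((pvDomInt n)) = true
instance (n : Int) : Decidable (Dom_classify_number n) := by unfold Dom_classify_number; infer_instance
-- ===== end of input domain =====

-- B replaces Counter/range machinery by a recursive frequency-partition of the digit list,
-- a length-guarded adjacent-difference straight test and run-count-based distinctness (objective: alternative).

-- ===== PORT A =====
-- int(d) for a single character; total stand-in (Pre_ admits only inputs where Python's int(d) succeeds)
def pyDigitVal (d : Char) : Int := (PySem.Int.ofChars? [d]).getD 0

def classifyA_core (digits : List Char) : String :=
  if PySem.Set.len (PySem.Set.ofList digits) == 1 then "four_same"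
  else
    let nums := digits.map pyDigitVal
    let n0 := PySem.List.pyGetD nums 0 0   -- nums[0] (digits is never empty here)
    if nums == PySem.List.pyRange n0 (n0 + 4) 1 || nums == PySem.List.pyRange n0 (n0 - 4) (-1) then "straight"
    else
      let c := PySem.Dict.counter digits
      if PySem.List.sorted c.values (fun v => v) == [(2 : Int), 2] then "two_pairs"
      else if PySem.List.sorted c.values (fun v => v) == [(1 : Int), 3] then "three_same"
      else if PySem.List.sorted c.values (fun v => v) == [(1 : Int), 1, 2] then "one_pair"
      else
        let all_odd := digits.all (fun d => PySem.Int.mod (pyDigitVal d) 2 != 0)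
        let all_even := digits.all (fun d => PySem.Int.mod (pyDigitVal d) 2 == 0)
        if (all_odd || all_even) && (PySem.Set.len (PySem.Set.ofList digits) == 4) then "special"
        else "none"

def classify_number (n : Int) : String :=
  let digits := PySem.Int.toChars n        -- list(str(n))
  if digits.contains '0' then ""
  else if n == 7777 then "jackpot"
  else classifyA_core digits

-- ===== PORT B =====
-- _freqs; fuel = d.length makes the recursion structural (kernel-reducible), same termination as Python's recursion
def freqsBAux (fuel : Nat) (d : List Char) : List Int :=
  match fuel, d with
  | 0, _ => []
  | _, [] => []
  | fuel + 1, x :: xs =>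
    let rest := (x :: xs).filter (fun c => c != x)
    (PySem.List.len (x :: xs) - PySem.List.len rest) :: freqsBAux fuel rest

def freqsB (d : List Char) : List Int := freqsBAux d.length d

def classifyB_tail (s : List Char) (part : List Int) : String :=
  -- ord(c) is c.toNat (exact: str(n) is ASCII)
  if PySem.List.len part == 4 && PySem.Set.len (PySem.Set.ofList (s.map (fun c => PySem.Int.mod ((c.toNat : Int)) 2))) == 1
  then "special" else "none"

def classifyB_core (s : List Char) : String :=
  let part := PySem.List.sorted (freqsB s) (fun x => x)
  if part == [PySem.List.len s] then "four_same"
  else if PySem.List.len s == 4 then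
    let steps := (s.zip (PySem.List.slice s (some 1) none)).map (fun p => ((p.2.toNat : Int)) - ((p.1.toNat : Int)))
    if steps == [(1 : Int), 1, 1] || steps == [(-1 : Int), -1, -1] then "straight"
    else if part == [(2 : Int), 2] then "two_pairs"
    else if part == [(1 : Int), 3] then "three_same"
    else if part == [(1 : Int), 1, 2] then "one_pair"
    else classifyB_tail s part
  else classifyB_tail s part

def classify_number_alt (n : Int) : String :=
  let s := PySem.Int.toChars n             -- list(str(n))
  if s.contains '0' then ""
  else if n == 7777 then "jackpot"
  else classifyB_core s

-- ===== PRECONDITION & SPEC =====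
-- Pre_ excludes exactly the inputs where A raises: negative n whose string has no '0'
-- (int('-') raises ValueError there); A returns normally on every other input.
def Pre_classify_number (n : Int) : Prop := 0 ≤ n ∨ '0' ∈ PySem.Int.toChars n
instance (n : Int) : Decidable (Pre_classify_number n) := by unfold Pre_classify_number; infer_instance
def pvWitness_classify_number : Int := 1234

def Spec_classify_number (n : Int) (out : String) : Prop := out = classify_number_alt n
instance (n : Int) (out : String) : Decidable (Spec_classify_number n out) := by unfold Spec_classify_number; infer_instance

-- ===== CLAIM (what is proved, stated in full; the proofs are below) =====
def Claim_equal_classify_number : Prop := ∀ (n : Int), Dom_classify_number n → Pre_classify_number n → Spec_classify_number n (classify_number n)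

-- ===== LEMMAS AND PROOFS =====

def D9 : List Char := ['1','2','3','4','5','6','7','8','9']
def digitList : List Char := ['0','1','2','3','4','5','6','7','8','9']

theorem filter_head (x : Char) (xs : List Char) :
    (x :: xs).filter (fun c => c != x) = xs.filter (fun c => c != x) := by
  simp

theorem len_filter_count (x : Char) (xs : List Char) :
    (xs.filter (fun c => c != x)).length + xs.count x = xs.length := by
  have h := List.length_eq_length_filter_add (l := xs) (f := fun c => c == x)
  have : xs.count x = (xs.filter (fun c => c == x)).length := by
    simp [List.count, List.countP_eq_length_filter]
  rw [this]
  have : (xs.filter fun c => c != x) = (xs.filter fun c => !(c == x)) := by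
    simp [bne]
  rw [this]; omega

theorem freqsBAux_perm (fuel : Nat) : ∀ (d : List Char), d.length ≤ fuel →
    (freqsBAux fuel d).Perm ((PySem.Set.ofList d).map (fun x => (d.count x : Int))) := by
  induction fuel with
  | zero =>
      intro d hd
      have : d = [] := List.eq_nil_of_length_eq_zero (by omega)
      subst this; simp [freqsBAux, PySem.Set.ofList]
  | succ fuel ih =>
      intro d hd
      match d with
      | [] => simp [freqsBAux, PySem.Set.ofList]
      | x :: xs =>
        rw [PySem.Set.ofList_cons]
        simp only [freqsBAux, filter_head]
        set rest := xs.filter (fun c => c != x) with hrest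
        have hlenrest : rest.length ≤ fuel := by
          have h1 : rest.length ≤ xs.length := by rw [hrest]; exact List.length_filter_le _ _
          simp at hd; omega
        have hhead : PySem.List.len (x :: xs) - PySem.List.len rest = (((x :: xs).count x : Nat) : Int) := by
          have h1 := len_filter_count x xs
          rw [← hrest] at h1
          simp [PySem.List.len_eq, List.count_cons_self]
          omega
        have htail1 : (freqsBAux fuel rest).Perm ((PySem.Set.ofList rest).map (fun y => (rest.count y : Int))) :=
          ih rest hlenrest
        have hcong : (PySem.Set.ofList rest).map (fun y => (rest.count y : Int))
            = (PySem.Set.ofList rest).map (fun y => ((x :: xs).count y : Int)) := by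
          apply List.map_congr_left
          intro y hy
          have hy' : y ∈ rest := by
            have := PySem.Set.mem_ofList (xs := rest) (y := y)
            exact this.mp hy
          have hyne : y ≠ x := by
            have := List.of_mem_filter hy'
            simpa using this
          have : rest.count y = xs.count y := by
            rw [hrest, List.count_filter]
            simp [hyne]
          rw [this]
          have hne' : ¬ x = y := fun h => hyne h.symm
          simp [hne']
        have hperm2 : (PySem.Set.ofList rest).Perm ((PySem.Set.ofList xs).discard x) := by
          rw [List.perm_ext_iff_of_nodup (PySem.Set.nodup_ofList _) (PySem.Set.nodup_discard _ _ (PySem.Set.nodup_ofList _))]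
          intro a
          rw [PySem.Set.mem_ofList, PySem.Set.mem_discard, PySem.Set.mem_ofList]
          constructor
          · intro ha
            have := List.of_mem_filter ha
            exact ⟨List.mem_of_mem_filter ha, by simpa using this⟩
          · intro ⟨ha, hne⟩
            exact List.mem_filter.mpr ⟨ha, by simpa using hne⟩
        have hstep : (freqsBAux fuel rest).Perm
            (((PySem.Set.ofList xs).discard x).map (fun y => ((x :: xs).count y : Int))) := by
          rw [hcong] at htail1
          exact htail1.trans (hperm2.map _)
        have hrw : (x :: (PySem.Set.ofList xs).discard x).map (fun y => (((x :: xs).count y : Nat) : Int))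
            = (((x :: xs).count x : Int) :: ((PySem.Set.ofList xs).discard x).map (fun y => ((x :: xs).count y : Int))) := by
          simp
        rw [hrw, hhead]
        exact hstep.cons _

theorem freqsB_perm (d : List Char) :
    (freqsB d).Perm ((PySem.Set.ofList d).map (fun x => (d.count x : Int))) :=
  freqsBAux_perm d.length d le_rfl

theorem freqsB_sum_aux (fuel : Nat) : ∀ (d : List Char), d.length ≤ fuel →
    (freqsBAux fuel d).sum = (d.length : Int) := by
  induction fuel with
  | zero =>
      intro d hd
      have : d = [] := List.eq_nil_of_length_eq_zero (by omega)
      subst this; simp [freqsBAux]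
  | succ fuel ih =>
      intro d hd
      match d with
      | [] => simp [freqsBAux]
      | x :: xs =>
        simp only [freqsBAux, filter_head, List.sum_cons]
        set rest := xs.filter (fun c => c != x) with hrest
        have h1 : rest.length ≤ xs.length := by rw [hrest]; exact List.length_filter_le _ _
        simp at hd
        rw [ih rest (by omega)]
        simp [PySem.List.len_eq]

theorem freqsB_sum (d : List Char) : (freqsB d).sum = (d.length : Int) :=
  freqsB_sum_aux d.length d le_rfl

theorem freqsBAux_nil (fuel : Nat) : freqsBAux fuel [] = [] := by cases fuel <;> rfl

theorem freqsB_const (x : Char) (xs : List Char) (h : ∀ y ∈ xs, y = x) :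
    freqsB (x :: xs) = [((x :: xs).length : Int)] := by
  show freqsBAux (xs.length + 1) (x :: xs) = _
  simp only [freqsBAux, filter_head]
  have hrest : xs.filter (fun c => c != x) = [] := by
    rw [List.filter_eq_nil_iff]
    intro a ha
    simp [h a ha]
  rw [hrest, freqsBAux_nil]
  simp [PySem.List.len_eq]

theorem ofList_length_one_iff {α : Type} [BEq α] [LawfulBEq α] (x : α) (xs : List α) :
    (PySem.Set.ofList (x :: xs)).length = 1 ↔ ∀ y ∈ xs, y = x := by
  rw [PySem.Set.ofList_cons]
  constructor
  · intro h y hy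
    have hd : (PySem.Set.ofList xs).discard x = [] := by
      cases hde : (PySem.Set.ofList xs).discard x with
      | nil => rfl
      | cons a t => rw [hde] at h; simp at h
    by_contra hne
    have : y ∈ (PySem.Set.ofList xs).discard x := by
      rw [PySem.Set.mem_discard, PySem.Set.mem_ofList]
      exact ⟨hy, hne⟩
    rw [hd] at this; simp at this
  · intro h
    have hd : (PySem.Set.ofList xs).discard x = [] := by
      rw [List.eq_nil_iff_forall_not_mem]
      intro y hy
      rw [PySem.Set.mem_discard, PySem.Set.mem_ofList] at hy
      exact hy.2 (h y hy.1)
    rw [hd]; rfl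

theorem pyRange4_asc (v : Int) : PySem.List.pyRange v (v + 4) 1 = [v, v+1, v+2, v+3] := by
  rw [PySem.List.pyRange_one]
  have h : v + 4 - v = 4 := by ring
  rw [h]
  simp [List.range_succ]

theorem pyRange4_desc (v : Int) : PySem.List.pyRange v (v - 4) (-1) = [v, v-1, v-2, v-3] := by
  rw [PySem.List.pyRange_neg_one]
  have h : v - (v - 4) = 4 := by ring
  rw [h]
  simp [List.range_succ]

theorem sorted_freqsB_length (d : List Char) :
    (PySem.List.sorted (freqsB d) (fun x => x)).length = (PySem.Set.ofList d).length := by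
  rw [PySem.List.length_sorted]
  exact (freqsB_perm d).length_eq.trans (by simp)

theorem pat_false (d : List Char) (pat : List Int) (hsum : pat.sum = 4) (hlen : d.length ≠ 4) :
    (PySem.List.sorted (freqsB d) (fun x => x) == pat) = false := by
  apply beq_eq_false_iff_ne.mpr
  intro h
  have h1 : (PySem.List.sorted (freqsB d) (fun x => x)).sum = (d.length : Int) := by
    rw [(PySem.List.sorted_perm (freqsB d) (fun x => x) false).sum_eq]
    exact freqsB_sum d
  rw [h, hsum] at h1
  omega

theorem four_same_eq (x : Char) (xs : List Char) :
    (PySem.Set.len (PySem.Set.ofList (x :: xs)) == (1 : Int))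
      = (PySem.List.sorted (freqsB (x :: xs)) (fun y => y) == [PySem.List.len (x :: xs)]) := by
  rw [Bool.eq_iff_iff]
  simp only [beq_iff_eq, PySem.Set.len, PySem.List.len_eq]
  constructor
  · intro h
    have h1 : ∀ y ∈ xs, y = x := (ofList_length_one_iff x xs).mp (by exact_mod_cast h)
    rw [freqsB_const x xs h1]
    rw [PySem.List.sorted_eq_self_of_pairwise _ _ (List.pairwise_singleton _ _)]
  · intro h
    have h1 : (PySem.List.sorted (freqsB (x :: xs)) (fun y => y)).length = 1 := by rw [h]; rfl
    rw [sorted_freqsB_length] at h1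
    exact_mod_cast congrArg (Nat.cast : Nat → Int) h1

theorem mod2_val : ∀ c ∈ D9, PySem.Int.mod (pyDigitVal c) 2 = PySem.Int.mod ((c.toNat : Int)) 2
    ∧ (PySem.Int.mod ((c.toNat : Int)) 2 = 0 ∨ PySem.Int.mod ((c.toNat : Int)) 2 = 1) := by
  intro c hc
  fin_cases hc <;> exact ⟨by decide, by decide⟩

theorem pyDigitVal_eq : ∀ c ∈ D9, pyDigitVal c = (c.toNat : Int) - 48 := by
  intro c hc
  fin_cases hc <;> decide

theorem special_eq (x : Char) (xs : List Char) (H : ∀ c ∈ x :: xs, c ∈ D9) :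
    (((x :: xs).all (fun c => PySem.Int.mod (pyDigitVal c) 2 != 0)
        || (x :: xs).all (fun c => PySem.Int.mod (pyDigitVal c) 2 == 0))
      && (PySem.Set.len (PySem.Set.ofList (x :: xs)) == (4 : Int)))
    = ((PySem.List.len (PySem.List.sorted (freqsB (x :: xs)) (fun y => y)) == (4 : Int))
      && (PySem.Set.len (PySem.Set.ofList ((x :: xs).map (fun c => PySem.Int.mod ((c.toNat : Int)) 2))) == (1 : Int))) := by
  have hg := fun c hc => mod2_val c (H c hc)
  have h1 : (PySem.List.len (PySem.List.sorted (freqsB (x :: xs)) (fun y => y)) == (4 : Int))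
      = (PySem.Set.len (PySem.Set.ofList (x :: xs)) == (4 : Int)) := by
    simp only [PySem.List.len_eq, PySem.Set.len, sorted_freqsB_length]
  rw [h1, Bool.and_comm]
  congr 1
  rw [Bool.eq_iff_iff]
  simp only [List.map_cons, Bool.or_eq_true, List.all_eq_true, bne_iff_ne, ne_eq, beq_iff_eq,
    PySem.Set.len, Nat.cast_eq_one]
  rw [ofList_length_one_iff]
  constructor
  · rintro (h | h)
    · intro y hy
      obtain ⟨c, hc, rfl⟩ := List.mem_map.mp hy
      have hcg := hg c (List.mem_cons_of_mem _ hc)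
      have hxg := hg x (List.mem_cons_self ..)
      have e1 := h c (List.mem_cons_of_mem _ hc)
      have e2 := h x (List.mem_cons_self ..)
      rw [hcg.1] at e1
      rw [hxg.1] at e2
      rcases hcg.2 with u | u <;> rcases hxg.2 with v | v <;> omega
    · intro y hy
      obtain ⟨c, hc, rfl⟩ := List.mem_map.mp hy
      have e1 := h c (List.mem_cons_of_mem _ hc)
      have e2 := h x (List.mem_cons_self ..)
      rw [(hg c (List.mem_cons_of_mem _ hc)).1] at e1
      rw [(hg x (List.mem_cons_self ..)).1] at e2
      omega
  · intro h
    rcases (hg x (List.mem_cons_self ..)).2 with h0 | h1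
    · right
      intro c hc
      rw [(hg c hc).1]
      rcases List.mem_cons.mp hc with rfl | hc'
      · exact h0
      · have := h _ (List.mem_map_of_mem hc')
        omega
    · left
      intro c hc
      rw [(hg c hc).1]
      rcases List.mem_cons.mp hc with rfl | hc'
      · omega
      · have := h _ (List.mem_map_of_mem hc')
        omega

theorem straight_eq (a b c e : Char) (ha : a ∈ D9) (hb : b ∈ D9) (hc : c ∈ D9) (he : e ∈ D9) :
    (([a,b,c,e].map pyDigitVal == PySem.List.pyRange (PySem.List.pyGetD ([a,b,c,e].map pyDigitVal) 0 0) (PySem.List.pyGetD ([a,b,c,e].map pyDigitVal) 0 0 + 4) 1)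
      || ([a,b,c,e].map pyDigitVal == PySem.List.pyRange (PySem.List.pyGetD ([a,b,c,e].map pyDigitVal) 0 0) (PySem.List.pyGetD ([a,b,c,e].map pyDigitVal) 0 0 - 4) (-1)))
    = ((([a,b,c,e].zip (PySem.List.slice [a,b,c,e] (some 1) none)).map (fun p => ((p.2.toNat : Int)) - ((p.1.toNat : Int))) == [(1:Int),1,1])
      || (([a,b,c,e].zip (PySem.List.slice [a,b,c,e] (some 1) none)).map (fun p => ((p.2.toNat : Int)) - ((p.1.toNat : Int))) == [(-1:Int),-1,-1])) := by
  rw [PySem.List.slice_from_one]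
  simp only [List.map_cons, List.map_nil, List.tail_cons, List.zip_cons_cons, List.zip_nil_right,
    PySem.List.pyGetD_zero_cons]
  rw [pyDigitVal_eq a ha, pyDigitVal_eq b hb, pyDigitVal_eq c hc, pyDigitVal_eq e he]
  rw [pyRange4_asc, pyRange4_desc]
  rw [Bool.eq_iff_iff]
  simp only [Bool.or_eq_true, beq_iff_eq, List.cons.injEq, and_true, true_and]
  omega

theorem digitChar_mem (m : Nat) (h : m < 10) : Nat.digitChar m ∈ digitList := by
  interval_cases m <;> decide

theorem mem_toDigitsCore (fuel : Nat) : ∀ (n : Nat) (ds : List Char) (c : Char),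
    c ∈ Nat.toDigitsCore 10 fuel n ds → c ∈ ds ∨ c ∈ digitList := by
  induction fuel with
  | zero => intro n ds c h; exact Or.inl h
  | succ fuel ih =>
      intro n ds c h
      rw [Nat.toDigitsCore] at h
      by_cases h0 : n / 10 = 0
      · simp only [h0] at h
        rcases List.mem_cons.mp h with h | h
        · exact Or.inr (h ▸ digitChar_mem _ (Nat.mod_lt _ (by omega)))
        · exact Or.inl h
      · simp only [if_neg h0] at h
        rcases ih _ _ _ h with h | h
        · rcases List.mem_cons.mp h with h | h
          · exact Or.inr (h ▸ digitChar_mem _ (Nat.mod_lt _ (by omega)))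
          · exact Or.inl h
        · exact Or.inr h

theorem toDigitsCore_ne_nil (fuel : Nat) (n : Nat) (ds : List Char) (hf : fuel ≠ 0) :
    Nat.toDigitsCore 10 fuel n ds ≠ [] := by
  cases fuel with
  | zero => omega
  | succ fuel =>
      rw [Nat.toDigitsCore]
      by_cases h0 : n / 10 = 0
      · simp [h0]
      · simp only [if_neg h0]
        cases fuel with
        | zero => simp [Nat.toDigitsCore]
        | succ f => exact toDigitsCore_ne_nil _ _ _ (by omega)

theorem values_counter_eq (d : List Char) :
    (PySem.Dict.counter d).values = (PySem.Set.ofList d).map (fun x => (d.count x : Int)) := by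
  show ((PySem.Dict.counter d).items.map (fun p => p.2)) = _
  rw [PySem.Dict.items_counter, List.map_map]
  rfl

theorem sorted_values_eq (d : List Char) :
    PySem.List.sorted (PySem.Dict.counter d).values (fun v => v)
      = PySem.List.sorted (freqsB d) (fun x => x) := by
  rw [PySem.List.sorted_id_eq_sorted_id_iff_perm, values_counter_eq]
  exact (freqsB_perm d).symm

theorem range_beq_false (xs : List Int) (hx : xs.length ≠ 4) (v : Int) :
    (xs == PySem.List.pyRange v (v + 4) 1) = false ∧ (xs == PySem.List.pyRange v (v - 4) (-1)) = false := by
  constructor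
  · apply beq_eq_false_iff_ne.mpr
    intro h; apply hx; rw [h, pyRange4_asc]; rfl
  · apply beq_eq_false_iff_ne.mpr
    intro h; apply hx; rw [h, pyRange4_desc]; rfl

theorem core_eq (d : List Char) (hne : d ≠ []) (H : ∀ c ∈ d, c ∈ D9) :
    classifyA_core d = classifyB_core d := by
  match d, hne with
  | x :: xs, _ =>
    simp only [classifyA_core, classifyB_core]
    rw [sorted_values_eq, ← four_same_eq]
    by_cases h1 : (PySem.Set.len (PySem.Set.ofList (x :: xs)) == (1 : Int)) = true
    · rw [h1]; simp
    · rw [Bool.not_eq_true] at h1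
      simp only [h1, Bool.false_eq_true, if_false]
      by_cases h4 : (x :: xs).length = 4
      · have h3 : xs.length = 3 := by simpa using h4
        obtain ⟨b, c, e, rfl⟩ := List.length_eq_three.mp h3
        have hlen : (PySem.List.len [x, b, c, e] == (4 : Int)) = true := by
          simp [PySem.List.len_eq]
        rw [hlen]
        simp only [if_true]
        rw [straight_eq x b c e (H x (by simp)) (H b (by simp)) (H c (by simp)) (H e (by simp))]
        rw [special_eq x [b, c, e] H]
        rfl
      · have h4' : (PySem.List.len (x :: xs) == (4 : Int)) = false := by
          simp only [PySem.List.len_eq, beq_eq_false_iff_ne, ne_eq]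
          intro h; apply h4; exact_mod_cast h
        rw [h4']
        have hs := range_beq_false ((x :: xs).map pyDigitVal) (by simpa using h4)
          (PySem.List.pyGetD ((x :: xs).map pyDigitVal) 0 0)
        simp only [hs.1, hs.2, Bool.or_false, Bool.false_eq_true, if_false]
        rw [pat_false _ [(2 : Int), 2] (by decide) h4, pat_false _ [(1 : Int), 3] (by decide) h4,
          pat_false _ [(1 : Int), 1, 2] (by decide) h4]
        simp only [Bool.false_eq_true, if_false]
        rw [special_eq x xs H]
        rfl

theorem dig_ne0 : ∀ c ∈ digitList, c ≠ '0' → c ∈ D9 := by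
  intro c hc
  fin_cases hc <;> simp [D9]

theorem toChars_mem (n : Int) (hn : 0 ≤ n) (c : Char) (h : c ∈ PySem.Int.toChars n) : c ∈ digitList := by
  unfold PySem.Int.toChars at h
  rw [if_neg (by omega)] at h
  rcases mem_toDigitsCore _ _ _ _ h with h | h
  · simp at h
  · exact h

theorem toChars_ne_nil (n : Int) : PySem.Int.toChars n ≠ [] := by
  unfold PySem.Int.toChars
  by_cases h : n < 0
  · rw [if_pos h]; simp
  · rw [if_neg h]
    exact toDigitsCore_ne_nil _ _ _ (by omega)

theorem main_spec (n : Int) (hpre : 0 ≤ n ∨ '0' ∈ PySem.Int.toChars n) :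
    classify_number n = classify_number_alt n := by
  simp only [classify_number, classify_number_alt]
  by_cases hc : (PySem.Int.toChars n).contains '0' = true
  · rw [hc]; rfl
  · rw [Bool.not_eq_true] at hc
    simp only [hc, Bool.false_eq_true, if_false]
    by_cases h7 : (n == 7777) = true
    · rw [h7]; rfl
    · rw [Bool.not_eq_true] at h7
      simp only [h7, Bool.false_eq_true, if_false]
      have hmem : '0' ∉ PySem.Int.toChars n := by
        intro h
        rw [List.contains_eq_mem] at hc
        simp [h] at hc
      have hn : 0 ≤ n := by
        rcases hpre with h | h
        · exact h
        · exact absurd h hmem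
      apply core_eq _ (toChars_ne_nil n)
      intro c hcm
      exact dig_ne0 c (toChars_mem n hn c hcm) (by rintro rfl; exact hmem hcm)

-- ===== VERDICT (by name: the statement is the Claim_ definition above) =====
theorem classify_number_spec : Claim_equal_classify_number := by
  intro n _ hpre
  unfold Spec_classify_number
  exact main_spec n hpre
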